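-- pv_equiv track=rewrite | github.com/AGNMZ/mis_ejercicios_python_unsam | Clase05/envido.py | hay_tanto
-- ===== SOURCE A (Python) =====
-- from collections import Counter
--
-- def hay_tanto(mano):
--     # valores va a ser la lista con cada carta y el valor para el envido,
--     # el 10 11 y 12 no tienen valor para el envido.
--     valores = [(valor, palo) for valor, palo in mano if valor < 10]
--     valores += [(0, palo) for valor, palo in mano if valor >= 10]
--     #con contador cuento cuantas cartas hay de cada palo
--     contador = Counter()
--     for valor, palo in mano:
--         contador[palo] += 1
--     #con el comando most common puedo guardar cual es el palo para el tanto y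
--     #cuantas cartas tienen el mismo palo.
--     palo_tanto = contador.most_common(1)[0][0]
--     cartas_tanto = contador.most_common(1)[0][1]
--     # segun cuantas cartas tiene el tanto cuento los puntos, si solo es una carta
--     #simplemente tomo la mas grande, sino tengo que sumar las dos mas altas
--     #como es una mano de tres cartas, en el caso de flor, simplemente le reste
--     #el minimo
--     if cartas_tanto == 1:
--         tanto = max([valor for valor, palo in valores])
--     elif cartas_tanto == 2:
--         tanto = sum(
--             [valor for valor, palo in valores if palo == palo_tanto]) + 20
--     else:
--         tanto = sum([valor for valor, palo in valores]) - \
--             min([valor for valor, palo in valores]) + 20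
--     return tanto
-- ===== SOURCE B (Python) =====
-- def hay_tanto(mano):
--     # One pass: per-suit (count, envido-sum) dict plus running total / min / max
--     # of envido values; then pick the suit with the most cards (first wins ties).
--     stats = {}
--     total = 0
--     lo = hi = None
--     for v, p in mano:
--         e = v if v < 10 else 0
--         c, s = stats.get(p, (0, 0))
--         stats[p] = (c + 1, s + e)
--         total += e
--         lo = e if lo is None or e < lo else lo
--         hi = e if hi is None or e > hi else hi
--     best = max(stats.items(), key=lambda kv: kv[1][0])
--     cnt = best[1][0]
--     if cnt == 1:
--         return hi
--     if cnt == 2: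
--         return best[1][1] + 20
--     return total - lo + 20
-- ===== Notes on version B (the rewrite author's own statement) =====
-- stated objective: alternative
-- what changed: Replaces A's four list comprehensions plus a Counter and repeated most_common calls by a single pass that builds a suit -> (count, envido-sum) dict while tracking the running total/min/max envido value, then picks the most numerous suit with max(..., key=...).
-- outside the precondition, e.g. on hay_tanto([]): A raises IndexError, B raises ValueError
import Mathlib
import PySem

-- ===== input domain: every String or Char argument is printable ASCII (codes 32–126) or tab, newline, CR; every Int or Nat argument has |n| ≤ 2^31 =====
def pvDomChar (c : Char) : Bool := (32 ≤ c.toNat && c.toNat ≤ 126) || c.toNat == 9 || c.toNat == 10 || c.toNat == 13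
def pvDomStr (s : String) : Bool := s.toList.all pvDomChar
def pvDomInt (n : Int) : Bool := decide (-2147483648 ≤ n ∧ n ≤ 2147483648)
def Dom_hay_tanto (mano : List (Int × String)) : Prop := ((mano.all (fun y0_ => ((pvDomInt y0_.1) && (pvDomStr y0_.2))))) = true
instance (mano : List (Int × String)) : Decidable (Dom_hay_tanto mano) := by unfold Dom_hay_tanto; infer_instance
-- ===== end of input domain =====

-- B replaces A's four comprehensions + Counter + most_common by one pass building a
-- suit -> (count, envido-sum) dict with a running total/min/max; same results (alternative decomposition).

-- ===== PORT A =====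
def hay_tanto (mano : List (Int × String)) : Int :=
  let valores : List (Int × String) :=
    ((mano.filter (fun c => decide (c.1 < 10))).map (fun c => (c.1, c.2)))
      ++ ((mano.filter (fun c => decide (c.1 ≥ 10))).map (fun c => ((0 : Int), c.2)))
  let contador : PySem.Dict String Int :=
    mano.foldl (fun d c => d.insert c.2 (d.getD c.2 0 + 1)) PySem.Dict.empty
  -- contador.most_common(1)[0]: the first item with maximal count (heapq.nlargest is stable)
  match PySem.List.max? contador.items (fun kv => kv.2) with
  | none => 0  -- mano = []: Python raises IndexError; excluded by Pre_hay_tanto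
  | some pc =>
    let palo_tanto := pc.1
    let cartas_tanto := pc.2
    if cartas_tanto == 1 then
      (PySem.List.max? (valores.map (fun c => c.1)) (fun v => v)).getD 0
    else if cartas_tanto == 2 then
      ((valores.filter (fun c => c.2 == palo_tanto)).map (fun c => c.1)).sum + 20
    else
      (valores.map (fun c => c.1)).sum
        - (PySem.List.min? (valores.map (fun c => c.1)) (fun v => v)).getD 0 + 20

-- ===== PORT B =====
def hay_tanto_alt (mano : List (Int × String)) : Int :=
  let s :=
    mano.foldl
      (fun (a : PySem.Dict String (Int × Int) × Int × Option Int × Option Int) (c : Int × String) =>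
        let e : Int := if c.1 < 10 then c.1 else 0
        let cs := a.1.getD c.2 ((0 : Int), (0 : Int))
        (a.1.insert c.2 (cs.1 + 1, cs.2 + e),
         a.2.1 + e,
         (match a.2.2.1 with
          | none => some e
          | some l => if e < l then some e else some l),
         (match a.2.2.2 with
          | none => some e
          | some h => if e > h then some e else some h)))
      (PySem.Dict.empty, 0, none, none)
  match PySem.List.max? s.1.items (fun kv => kv.2.1) with
  | none => 0  -- mano = []: Python raises ValueError; excluded by Pre_hay_tanto
  | some best =>
    if best.2.1 == 1 then (s.2.2.2).getD 0
    else if best.2.1 == 2 then best.2.2 + 20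
    else s.2.1 - (s.2.2.1).getD 0 + 20

-- ===== PRECONDITION & SPEC =====
-- Pre_ excludes only the empty hand, on which A raises IndexError (and B raises ValueError).
def Pre_hay_tanto (mano : List (Int × String)) : Prop := mano ≠ []
instance (mano : List (Int × String)) : Decidable (Pre_hay_tanto mano) := by unfold Pre_hay_tanto; infer_instance
def pvWitness_hay_tanto : (List (Int × String)) := [(7, "oro"), (6, "oro"), (11, "copa")]
def Spec_hay_tanto (mano : List (Int × String)) (out : Int) : Prop := out = hay_tanto_alt mano
instance (mano : List (Int × String)) (out : Int) : Decidable (Spec_hay_tanto mano out) := by unfold Spec_hay_tanto; infer_instance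

-- ===== CLAIM (what is proved, stated in full; the proofs are below) =====
def Claim_equal_hay_tanto : Prop := ∀ (mano : List (Int × String)), Dom_hay_tanto mano → Pre_hay_tanto mano → Spec_hay_tanto mano (hay_tanto mano)

-- ===== LEMMAS AND PROOFS =====

-- envido value of a card
def pvEnv (c : Int × String) : Int := if c.1 < 10 then c.1 else 0
-- number of cards of suit k (as A's Counter counts them)
def pvCnt (mano : List (Int × String)) (k : String) : Int := ((mano.map (·.2)).count k : Int)
-- sum of envido values of the cards of suit k
def pvSEnv (mano : List (Int × String)) (k : String) : Int :=
  ((mano.filter (fun c => c.2 == k)).map pvEnv).sum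
-- B's per-suit dict step, B's running-min step and running-max step (named for the lemmas)
def pvFd (d : PySem.Dict String (Int × Int)) (c : Int × String) : PySem.Dict String (Int × Int) :=
  d.insert c.2 ((d.getD c.2 (0, 0)).1 + 1, (d.getD c.2 (0, 0)).2 + pvEnv c)
def pvFl (o : Option Int) (c : Int × String) : Option Int :=
  match o with
  | none => some (pvEnv c)
  | some l => if pvEnv c < l then some (pvEnv c) else some l
def pvFh (o : Option Int) (c : Int × String) : Option Int :=
  match o with
  | none => some (pvEnv c)
  | some h => if pvEnv c > h then some (pvEnv c) else some h

-- B's 4-component fold is the product of four independent folds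
theorem pvB_split (l : List (Int × String)) :
    ∀ (a : PySem.Dict String (Int × Int) × Int × Option Int × Option Int),
    l.foldl
      (fun (a : PySem.Dict String (Int × Int) × Int × Option Int × Option Int) (c : Int × String) =>
        let e : Int := if c.1 < 10 then c.1 else 0
        let cs := a.1.getD c.2 ((0 : Int), (0 : Int))
        (a.1.insert c.2 (cs.1 + 1, cs.2 + e),
         a.2.1 + e,
         (match a.2.2.1 with
          | none => some e
          | some l => if e < l then some e else some l),
         (match a.2.2.2 with
          | none => some e
          | some h => if e > h then some e else some h))) a
      = (l.foldl pvFd a.1, l.foldl (fun t c => t + pvEnv c) a.2.1,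
         l.foldl pvFl a.2.2.1, l.foldl pvFh a.2.2.2) := by
  induction l with
  | nil => intro a; rfl
  | cons c t ih =>
    intro a
    simp only [List.foldl_cons]
    exact ih _

-- the per-suit dict holds (count, envido sum) for every suit
theorem pv_stats_getD (l : List (Int × String)) :
    ∀ (d : PySem.Dict String (Int × Int)) (k : String),
    (l.foldl pvFd d).getD k (0, 0)
      = ((d.getD k (0, 0)).1 + pvCnt l k, (d.getD k (0, 0)).2 + pvSEnv l k) := by
  induction l with
  | nil => intro d k; simp [pvCnt, pvSEnv]
  | cons c t ih =>
    intro d k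
    rw [List.foldl_cons, ih (pvFd d c) k]
    by_cases h : k = c.2
    · subst h
      simp only [pvFd, PySem.Dict.getD_insert, pvCnt, pvSEnv,
        List.map_cons, List.count_cons, List.filter_cons, beq_self_eq_true,
        if_pos, List.sum_cons]
      rw [Prod.mk.injEq]
      push_cast
      exact ⟨by ring, by ring⟩
    · simp only [pvFd, PySem.Dict.getD_insert, if_neg h, pvCnt, pvSEnv,
        List.map_cons, List.count_cons, List.filter_cons]
      have hb : (c.2 == k) = false := by simp [beq_eq_false_iff_ne]; exact fun e => h e.symm
      simp [hb]

theorem pv_stats_keys (mano : List (Int × String)) :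
    (mano.foldl pvFd PySem.Dict.empty).keys = PySem.Set.ofList (mano.map (·.2)) := by
  rw [show pvFd = (fun d (c : Int × String) => d.insert c.2
      ((fun d (c : Int × String) => ((d.getD c.2 (0,0)).1 + 1, (d.getD c.2 (0,0)).2 + pvEnv c)) d c)) from rfl]
  rw [PySem.Dict.keys_foldl_insert_key]
  simp [PySem.Set.update_nil_left]

theorem pv_stats_nodup (mano : List (Int × String)) :
    (mano.foldl pvFd PySem.Dict.empty).keys.Nodup := by
  rw [show pvFd = (fun d (c : Int × String) => d.insert c.2
      ((fun d (c : Int × String) => ((d.getD c.2 (0,0)).1 + 1, (d.getD c.2 (0,0)).2 + pvEnv c)) d c)) from rfl]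
  apply PySem.Dict.nodup_keys_foldl_insert_key
  exact PySem.Dict.nodup_keys_empty

-- B's dict, as a list of items over the suits in first-occurrence order
theorem pv_stats_items (mano : List (Int × String)) :
    (mano.foldl pvFd PySem.Dict.empty).items
      = (PySem.Set.ofList (mano.map (·.2))).map (fun k => (k, (pvCnt mano k, pvSEnv mano k))) := by
  rw [PySem.Dict.items_eq_map_keys _ (pv_stats_nodup mano) ((0 : Int), (0 : Int))]
  rw [pv_stats_keys]
  apply List.map_congr_left
  intro k _
  rw [pv_stats_getD]
  simp [PySem.Dict.getD_empty]

-- A's Counter loop is Counter(suits)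
theorem pv_contador (mano : List (Int × String)) :
    mano.foldl (fun (d : PySem.Dict String Int) (c : Int × String) => d.insert c.2 (d.getD c.2 0 + 1)) PySem.Dict.empty
      = PySem.Dict.counter (mano.map (·.2)) := by
  rw [← PySem.Dict.foldl_insert_getD_add_one_eq_counter, List.foldl_map]

-- max? over a mapped list selects through the map (first-maximal is positional)
theorem pv_max?_map_aux {α β κ : Type} [LT κ] [DecidableLT κ] (F : α → β) (K : β → κ) :
    ∀ (S : List α) (o : Option α),
    List.foldl (fun (acc : Option β) x => match acc with
        | none => some x
        | some m => if K m < K x then some x else some m) (Option.map F o) (S.map F)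
      = Option.map F (List.foldl (fun acc x => match acc with
        | none => some x
        | some m => if K (F m) < K (F x) then some x else some m) o S) := by
  intro S
  induction S with
  | nil => intro o; simp
  | cons c t ih =>
    intro o
    rw [List.map_cons, List.foldl_cons, List.foldl_cons]
    cases o with
    | none => exact ih (some c)
    | some m =>
      simp only [Option.map_some]
      by_cases h : K (F m) < K (F c)
      · simp only [if_pos h]; exact ih (some c)
      · simp only [if_neg h]; exact ih (some m)

theorem pv_max?_map {α β κ : Type} [LT κ] [DecidableLT κ] (F : α → β) (K : β → κ)
    (S : List α) :
    PySem.List.max? (S.map F) K = Option.map F (PySem.List.max? S (fun a => K (F a))) := by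
  unfold PySem.List.max?
  exact pv_max?_map_aux F K S none

-- the value of max?/min? with identity key only depends on the multiset (Int)
theorem pv_max?_perm (l₁ l₂ : List Int) (hp : l₁.Perm l₂) :
    PySem.List.max? l₁ (fun x => x) = PySem.List.max? l₂ (fun x => x) := by
  cases h₁ : PySem.List.max? l₁ (fun x => x) with
  | none =>
    rw [PySem.List.max?_eq_none_iff] at h₁
    subst h₁
    rw [List.nil_perm.mp hp]; rfl
  | some m₁ =>
    cases h₂ : PySem.List.max? l₂ (fun x => x) with
    | none =>
      rw [PySem.List.max?_eq_none_iff] at h₂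
      subst h₂
      exact absurd (hp.mem_iff.mp (PySem.List.max?_mem h₁)) (by simp)
    | some m₂ =>
      have hm₁ := PySem.List.max?_mem h₁
      have hm₂ := PySem.List.max?_mem h₂
      have hle₁ := PySem.List.max?_isMax h₁ m₂ (hp.mem_iff.mpr hm₂)
      have hle₂ := PySem.List.max?_isMax h₂ m₁ (hp.mem_iff.mp hm₁)
      simp only [Option.some.injEq]
      omega

theorem pv_min?_perm (l₁ l₂ : List Int) (hp : l₁.Perm l₂) :
    PySem.List.min? l₁ (fun x => x) = PySem.List.min? l₂ (fun x => x) := by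
  cases h₁ : PySem.List.min? l₁ (fun x => x) with
  | none =>
    rw [PySem.List.min?_eq_none_iff] at h₁
    subst h₁
    rw [List.nil_perm.mp hp]; rfl
  | some m₁ =>
    cases h₂ : PySem.List.min? l₂ (fun x => x) with
    | none =>
      rw [PySem.List.min?_eq_none_iff] at h₂
      subst h₂
      exact absurd (hp.mem_iff.mp (PySem.List.min?_mem h₁)) (by simp)
    | some m₂ =>
      have hm₁ := PySem.List.min?_mem h₁
      have hm₂ := PySem.List.min?_mem h₂
      have hle₁ := PySem.List.min?_isMin h₁ m₂ (hp.mem_iff.mpr hm₂)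
      have hle₂ := PySem.List.min?_isMin h₂ m₁ (hp.mem_iff.mp hm₁)
      simp only [Option.some.injEq]
      omega

-- B's running max/min loops compute max?/min? of the envido values
theorem pv_hi_fold (t : List (Int × String)) :
    ∀ (h0 : Int), t.foldl pvFh (some h0) = some (t.foldl (fun a c => max a (pvEnv c)) h0) := by
  induction t with
  | nil => intro h0; rfl
  | cons c t ih =>
    intro h0
    rw [List.foldl_cons, List.foldl_cons]
    have step : pvFh (some h0) c = some (max h0 (pvEnv c)) := by
      show (if pvEnv c > h0 then some (pvEnv c) else some h0) = _
      split_ifs with h <;> simp <;> omega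
    rw [step, ih]

theorem pv_lo_fold (t : List (Int × String)) :
    ∀ (h0 : Int), t.foldl pvFl (some h0) = some (t.foldl (fun a c => min a (pvEnv c)) h0) := by
  induction t with
  | nil => intro h0; rfl
  | cons c t ih =>
    intro h0
    rw [List.foldl_cons, List.foldl_cons]
    have step : pvFl (some h0) c = some (min h0 (pvEnv c)) := by
      show (if pvEnv c < h0 then some (pvEnv c) else some h0) = _
      split_ifs with h <;> simp <;> omega
    rw [step, ih]

theorem pv_hi_eq_max? (c : Int × String) (t : List (Int × String)) :
    (c :: t).foldl pvFh none = PySem.List.max? ((c :: t).map pvEnv) (fun x => x) := by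
  rw [List.foldl_cons, List.map_cons, PySem.List.max?_id_cons, List.foldl_map]
  exact pv_hi_fold t (pvEnv c)

theorem pv_lo_eq_min? (c : Int × String) (t : List (Int × String)) :
    (c :: t).foldl pvFl none = PySem.List.min? ((c :: t).map pvEnv) (fun x => x) := by
  rw [List.foldl_cons, List.map_cons, PySem.List.min?_id_cons, List.foldl_map]
  exact pv_lo_fold t (pvEnv c)

-- A's `valores` list is a permutation of the cards with their envido values, in card order
theorem pv_valores_perm (mano : List (Int × String)) :
    ((mano.filter (fun c => decide (c.1 < 10))).map (fun c => ((c.1, c.2) : Int × String))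
      ++ (mano.filter (fun c => decide (c.1 ≥ 10))).map (fun c => ((0 : Int), c.2))).Perm
    (mano.map (fun c => (pvEnv c, c.2))) := by
  have h1 : (mano.filter (fun c => decide (c.1 < 10))).map (fun c => ((c.1, c.2) : Int × String))
      = (mano.filter (fun c => decide (c.1 < 10))).map (fun c => (pvEnv c, c.2)) := by
    apply List.map_congr_left
    intro c hc
    have := (List.mem_filter.mp hc).2
    simp at this
    simp [pvEnv, this]
  have h2 : (mano.filter (fun c => decide (c.1 ≥ 10))).map (fun c => ((0 : Int), c.2))
      = (mano.filter (fun c => decide (c.1 ≥ 10))).map (fun c => (pvEnv c, c.2)) := by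
    apply List.map_congr_left
    intro c hc
    have := (List.mem_filter.mp hc).2
    simp at this
    have h10 : ¬ (c.1 < 10) := by omega
    simp [pvEnv, h10]
  have h3 : (fun (c : Int × String) => decide (c.1 ≥ 10)) = (fun c => !decide (c.1 < 10)) := by
    funext c
    by_cases h : c.1 < 10
    · simp [h]
    · simp [h]
      omega
  rw [h1, h2, h3, ← List.map_append]
  exact (List.filter_append_perm _ mano).map _

-- ===== VERDICT (by name: the statement is the Claim_ definition above) =====
theorem hay_tanto_spec : Claim_equal_hay_tanto := by
  intro mano hdom hpre
  unfold Spec_hay_tanto hay_tanto hay_tanto_alt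
  rw [pvB_split, pv_contador]
  dsimp only
  rw [PySem.Dict.items_counter]
  rw [pv_stats_items]
  rw [pv_max?_map (fun k => (k, ((List.count k (mano.map (·.2)) : Nat) : Int))) (fun kv => kv.2)]
  rw [pv_max?_map (fun k => (k, (pvCnt mano k, pvSEnv mano k))) (fun kv => kv.2.1)]
  simp only [pvCnt]
  cases hsel : PySem.List.max? (PySem.Set.ofList (List.map (fun x => x.2) mano))
      (fun a => ((List.count a (List.map (fun x => x.2) mano) : Nat) : Int)) with
  | none => rfl
  | some k =>
    simp only [Option.map_some]
    obtain ⟨c, t, rfl⟩ : ∃ c t, mano = c :: t := by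
      cases mano with
      | nil => exact absurd rfl hpre
      | cons c t => exact ⟨c, t, rfl⟩
    have hperm := pv_valores_perm (c :: t)
    have hvals := hperm.map (fun p => p.1)
    rw [List.map_map] at hvals
    have hvals' : ((c :: t).map ((fun (p : Int × String) => p.1) ∘ fun c => (pvEnv c, c.2)))
        = (c :: t).map pvEnv := by
      apply List.map_congr_left; intro x _; rfl
    rw [hvals'] at hvals
    by_cases h1 : ((List.count k (List.map (fun x => x.2) (c :: t)) : Nat) : Int) == 1
    · simp only [h1, if_pos]
      rw [pv_hi_eq_max? c t, pv_max?_perm _ _ hvals]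
    · simp only [h1]
      by_cases h2 : ((List.count k (List.map (fun x => x.2) (c :: t)) : Nat) : Int) == 2
      · simp only [h2, if_pos]
        have hf := hperm.filter (fun p => p.2 == k)
        rw [List.filter_map] at hf
        have hcomp : (List.filter ((fun (p : Int × String) => p.2 == k) ∘ fun c => (pvEnv c, c.2)) (c :: t))
            = List.filter (fun c => c.2 == k) (c :: t) := by
          apply List.filter_congr; intro x _; rfl
        rw [hcomp] at hf
        have hsum := (hf.map (fun p : Int × String => p.1)).sum_eq
        rw [List.map_map] at hsum
        have hm : ((List.filter (fun c => c.2 == k) (c :: t)).map ((fun (p : Int × String) => p.1) ∘ fun c => (pvEnv c, c.2)))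
            = (List.filter (fun c => c.2 == k) (c :: t)).map pvEnv := by
          apply List.map_congr_left; intro x _; rfl
        rw [hm] at hsum
        rw [hsum]
        rfl
      · simp only [h2]
        rw [hvals.sum_eq]
        rw [pv_lo_eq_min? c t, pv_min?_perm _ _ hvals]
        rw [PySem.List.foldl_add]
        simp
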